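-- pv_equiv track=rewrite | github.com/merry-hyelyn/Algorithm | Programmers/tshirts.py | solution
-- ===== SOURCE A (Python) =====
-- from collections import deque
--
-- def solution(people, tshirts):
--     answer = 0
--     people.sort()
--     tshirts.sort()
--     people = deque(people)
--     for t in tshirts:
--         if people and (t == people[0] or t > people[0]):
--             people.popleft()
--             answer += 1
--     return answer
-- ===== SOURCE B (Python) =====
-- def solution(people, tshirts):
--     people.sort()
--     tshirts.sort()
--     # one merged event stream: person p -> 2*p, tshirt t -> 2*t+1,
--     # so a person comes before an equal-sized tshirt and 2*p <= 2*t+1 iff p <= t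
--     events = sorted([2 * p for p in people] + [2 * t + 1 for t in tshirts])
--     waiting = 0
--     answer = 0
--     for e in events:
--         if e % 2 == 0:
--             waiting += 1
--         elif waiting:
--             waiting -= 1
--             answer += 1
--     return answer
-- ===== Notes on version B (the rewrite author's own statement) =====
-- stated objective: alternative
-- what changed: Replaced the deque two-pointer greedy (pop the smallest waiting person per fitting tshirt) with a single sorted event sweep: people and tshirts are merged into one sorted stream of tagged events (person 2*p, tshirt 2*t+1) and swept once with an integer waiting counter.
import Mathlib
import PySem

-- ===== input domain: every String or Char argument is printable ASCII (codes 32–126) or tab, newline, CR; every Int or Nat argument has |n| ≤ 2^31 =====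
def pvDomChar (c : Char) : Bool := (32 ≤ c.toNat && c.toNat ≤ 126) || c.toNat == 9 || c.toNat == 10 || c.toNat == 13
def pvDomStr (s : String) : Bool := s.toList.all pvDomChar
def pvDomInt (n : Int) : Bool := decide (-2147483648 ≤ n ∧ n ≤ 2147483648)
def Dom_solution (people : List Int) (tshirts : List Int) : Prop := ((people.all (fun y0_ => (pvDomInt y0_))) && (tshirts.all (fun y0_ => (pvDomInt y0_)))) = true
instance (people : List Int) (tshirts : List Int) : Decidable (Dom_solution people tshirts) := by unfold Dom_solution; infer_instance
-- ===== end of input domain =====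

-- B replaces A's deque two-pointer greedy by a single sorted event sweep with a waiting counter
-- (objective: alternative). Both Pythons sort `people` and `tshirts` in place; equivalence proved
-- here is about the RETURN value.

-- ===== PORT A =====
def solution (people : List Int) (tshirts : List Int) : Int :=
  -- answer = 0; people.sort(); tshirts.sort(); people = deque(people)
  let ppl := PySem.List.sorted people (fun x => x) false
  let ts := PySem.List.sorted tshirts (fun x => x) false
  -- for t in tshirts: if people and (t == people[0] or t > people[0]): people.popleft(); answer += 1
  (ts.foldl (fun (st : List Int × Int) t =>
      match st.1 with
      | [] => st
      | p :: rest => if t = p ∨ t > p then (rest, st.2 + 1) else st) (ppl, 0)).2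

-- ===== PORT B =====
def solution_alt (people : List Int) (tshirts : List Int) : Int :=
  let ppl := PySem.List.sorted people (fun x => x) false
  let ts := PySem.List.sorted tshirts (fun x => x) false
  -- events = sorted([2*p for p in people] + [2*t+1 for t in tshirts])
  let events := PySem.List.sorted (ppl.map (fun p => 2 * p) ++ ts.map (fun t => 2 * t + 1)) (fun x => x) false
  -- waiting = 0; answer = 0; for e in events: …
  (events.foldl (fun (st : Int × Int) e =>
      if PySem.Int.mod e 2 = 0 then (st.1 + 1, st.2)
      else if st.1 ≠ 0 then (st.1 - 1, st.2 + 1)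
      else st) ((0 : Int), (0 : Int))).2

-- ===== PRECONDITION & SPEC =====
def Spec_solution (people : List Int) (tshirts : List Int) (out : Int) : Prop := out = solution_alt people tshirts
instance (people : List Int) (tshirts : List Int) (out : Int) : Decidable (Spec_solution people tshirts out) := by unfold Spec_solution; infer_instance

-- ===== CLAIM (what is proved, stated in full; the proofs are below) =====
def Claim_equal_solution : Prop := ∀ (people : List Int) (tshirts : List Int), Dom_solution people tshirts → Spec_solution people tshirts (solution people tshirts)

-- ===== LEMMAS AND PROOFS =====

-- match count of A's loop, as a recursion over (queue, tshirts)
def aCnt : List Int → List Int → Int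
  | _, [] => 0
  | [], _ :: ts => aCnt [] ts
  | p :: rest, t :: ts => if t = p ∨ t > p then 1 + aCnt rest ts else aCnt (p :: rest) ts

-- match count of B's sweep, as a recursion over (waiting, events)
def bCnt : Int → List Int → Int
  | _, [] => 0
  | w, e :: es => if PySem.Int.mod e 2 = 0 then bCnt (w + 1) es
                  else if w ≠ 0 then 1 + bCnt (w - 1) es
                  else bCnt w es

-- the merge of the two tagged sorted lists (= B's sorted event list)
def evMerge : List Int → List Int → List Int
  | [], T => T.map (fun t => 2 * t + 1)
  | p :: ps, [] => (2 * p) :: evMerge ps []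
  | p :: ps, t :: ts =>
      if p ≤ t then (2 * p) :: evMerge ps (t :: ts)
      else (2 * t + 1) :: evMerge (p :: ps) ts
termination_by P T => P.length + T.length

theorem foldA_eq (ts : List Int) : ∀ (q : List Int) (a : Int),
    (ts.foldl (fun (st : List Int × Int) t =>
      match st.1 with
      | [] => st
      | p :: rest => if t = p ∨ t > p then (rest, st.2 + 1) else st) (q, a)).2 = a + aCnt q ts := by
  induction ts with
  | nil => intro q a; simp [aCnt]
  | cons t ts ih =>
    intro q a
    cases q with
    | nil => simp [aCnt, List.foldl_cons, ih]
    | cons p rest =>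
      by_cases h : t = p ∨ t > p
      · simp [aCnt, List.foldl_cons, h, ih]; ring
      · simp [aCnt, List.foldl_cons, h, ih]

theorem foldB_eq (es : List Int) : ∀ (w a : Int),
    (es.foldl (fun (st : Int × Int) e =>
      if PySem.Int.mod e 2 = 0 then (st.1 + 1, st.2)
      else if st.1 ≠ 0 then (st.1 - 1, st.2 + 1)
      else st) (w, a)).2 = a + bCnt w es := by
  induction es with
  | nil => intro w a; simp [bCnt]
  | cons e es ih =>
    intro w a
    simp only [List.foldl_cons, bCnt]
    by_cases h : PySem.Int.mod e 2 = 0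
    · rw [if_pos h, if_pos h, ih]
    · by_cases hw : w ≠ 0
      · rw [if_neg h, if_neg h, if_pos hw, if_pos hw, ih]; ring
      · rw [if_neg h, if_neg h, if_neg hw, if_neg hw, ih]

theorem mod_two_even (p : Int) : PySem.Int.mod (2 * p) 2 = 0 := by
  simp [PySem.Int.mod]

theorem mod_two_odd (t : Int) : PySem.Int.mod (2 * t + 1) 2 = 1 := by
  simp [PySem.Int.mod]

theorem mem_evMerge (P T : List Int) (x : Int) :
    x ∈ evMerge P T ↔ (∃ p ∈ P, x = 2 * p) ∨ (∃ t ∈ T, x = 2 * t + 1) := by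
  fun_induction evMerge P T with
  | case1 T => simp [eq_comm]
  | case2 p ps ih => simp [ih]
  | case3 p ps t ts h ih => simp [ih, or_assoc, or_left_comm]
  | case4 p ps t ts h ih => simp [ih, or_assoc, or_left_comm]

theorem evMerge_perm (P T : List Int) :
    (evMerge P T).Perm (P.map (fun p => 2 * p) ++ T.map (fun t => 2 * t + 1)) := by
  fun_induction evMerge P T with
  | case1 T => simp
  | case2 p ps ih => simpa using ih.cons (2 * p)
  | case3 p ps t ts h ih => simpa using ih.cons (2 * p)
  | case4 p ps t ts h ih =>
    simpa using (ih.cons (2 * t + 1)).trans List.perm_middle.symm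

theorem evMerge_pairwise (P T : List Int)
    (hP : P.Pairwise (· ≤ ·)) (hT : T.Pairwise (· ≤ ·)) :
    (evMerge P T).Pairwise (· ≤ ·) := by
  fun_induction evMerge P T with
  | case1 T =>
    simpa [List.pairwise_map] using hT.imp (by intro a b h; omega)
  | case2 p ps ih =>
    refine List.Pairwise.cons ?_ (ih (List.pairwise_cons.1 hP).2 hT)
    intro x hx
    rcases (mem_evMerge ps [] x).1 hx with ⟨q, hq, rfl⟩ | ⟨t, ht, rfl⟩
    · have := (List.pairwise_cons.1 hP).1 q hq; omega
    · simp at ht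
  | case3 p ps t ts h ih =>
    refine List.Pairwise.cons ?_ (ih (List.pairwise_cons.1 hP).2 hT)
    intro x hx
    rcases (mem_evMerge ps (t :: ts) x).1 hx with ⟨q, hq, rfl⟩ | ⟨t', ht', rfl⟩
    · have := (List.pairwise_cons.1 hP).1 q hq; omega
    · rcases List.mem_cons.1 ht' with rfl | ht'
      · omega
      · have := (List.pairwise_cons.1 hT).1 t' ht'; omega
  | case4 p ps t ts h ih =>
    refine List.Pairwise.cons ?_ (ih hP (List.pairwise_cons.1 hT).2)
    intro x hx
    rcases (mem_evMerge (p :: ps) ts x).1 hx with ⟨q, hq, rfl⟩ | ⟨t', ht', rfl⟩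
    · rcases List.mem_cons.1 hq with rfl | hq
      · omega
      · have := (List.pairwise_cons.1 hP).1 q hq; omega
    · have := (List.pairwise_cons.1 hT).1 t' ht'; omega

theorem evMerge_nil (P : List Int) : evMerge P [] = P.map (fun p => 2 * p) := by
  induction P with
  | nil => simp [evMerge]
  | cons p ps ih => simp [evMerge, ih]

theorem evMerge_nil_left (T : List Int) : evMerge [] T = T.map (fun t => 2 * t + 1) := by
  simp [evMerge]

theorem bCnt_cons_even (p w : Int) (es : List Int) :
    bCnt w ((2 * p) :: es) = bCnt (w + 1) es := by
  simp only [bCnt, mod_two_even]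
  norm_num

theorem bCnt_cons_odd (t w : Int) (es : List Int) :
    bCnt w ((2 * t + 1) :: es) = if w ≠ 0 then 1 + bCnt (w - 1) es else bCnt w es := by
  simp only [bCnt, mod_two_odd]
  norm_num

theorem bCnt_evens (P : List Int) (w : Int) : bCnt w (P.map (fun p => 2 * p)) = 0 := by
  induction P generalizing w with
  | nil => simp [bCnt]
  | cons p ps ih => simp only [List.map_cons, bCnt_cons_even, ih]

theorem aCnt_nil_cons (t : Int) (ts : List Int) : aCnt [] (t :: ts) = aCnt [] ts := rfl

theorem aCnt_cons_cons (x : Int) (q : List Int) (t : Int) (ts : List Int) :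
    aCnt (x :: q) (t :: ts) = if t = x ∨ t > x then 1 + aCnt q ts else aCnt (x :: q) ts := rfl

-- the core correspondence: A's loop on queue W ++ P over sorted tshirts T equals
-- B's sweep over the merged events, with waiting counter = |W|, provided every
-- waiting person fits every remaining tshirt.
theorem main_corr (T : List Int) : ∀ (P W : List Int),
    P.Pairwise (· ≤ ·) → T.Pairwise (· ≤ ·) →
    (∀ x ∈ W, ∀ t ∈ T, x ≤ t) →
    aCnt (W ++ P) T = bCnt (W.length : Int) (evMerge P T) := by
  induction T with
  | nil =>
    intro P W _ _ _
    rw [evMerge_nil, bCnt_evens]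
    cases W ++ P <;> rfl
  | cons t ts ihT =>
    intro P
    induction P with
    | nil =>
      intro W hP hT hW
      rw [evMerge_nil_left, List.map_cons, ← evMerge_nil_left, bCnt_cons_odd]
      cases W with
      | nil =>
        have hc : ¬ ((List.length ([] : List Int) : Int) ≠ 0) := by simp
        rw [List.nil_append, if_neg hc, aCnt_nil_cons]
        exact ihT [] [] (by simp) (List.pairwise_cons.1 hT).2 (by simp)
      | cons x W' =>
        have hxt : x ≤ t := hW x (by simp) t (by simp)
        have hc1 : t = x ∨ t > x := by omega
        have hc2 : ((x :: W').length : Int) ≠ 0 := by push_cast [List.length_cons]; omega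
        rw [List.append_nil, aCnt_cons_cons, if_pos hc1, if_pos hc2,
            show ((x :: W').length : Int) - 1 = (W'.length : Int) from by push_cast [List.length_cons]; omega]
        rw [show aCnt W' ts = aCnt (W' ++ []) ts from by rw [List.append_nil]]
        rw [ihT [] W' (by simp) (List.pairwise_cons.1 hT).2
          (fun y hy t' ht' => hW y (List.mem_cons_of_mem x hy) t' (List.mem_cons_of_mem t ht'))]
    | cons p ps ihP =>
      intro W hP hT hW
      by_cases hpt : p ≤ t
      · rw [show evMerge (p :: ps) (t :: ts) = (2 * p) :: evMerge ps (t :: ts) from by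
          simp [evMerge, hpt], bCnt_cons_even, List.append_cons,
          show (W.length : Int) + 1 = ((W ++ [p]).length : Int) from by simp]
        refine ihP (W ++ [p]) (List.pairwise_cons.1 hP).2 hT ?_
        intro x hx t' ht'
        rcases List.mem_append.1 hx with hx | hx
        · exact hW x hx t' ht'
        · simp only [List.mem_singleton] at hx; subst hx
          rcases List.mem_cons.1 ht' with rfl | ht'
          · exact hpt
          · exact le_trans hpt ((List.pairwise_cons.1 hT).1 t' ht')
      · rw [show evMerge (p :: ps) (t :: ts) = (2 * t + 1) :: evMerge (p :: ps) ts from by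
          simp [evMerge, hpt], bCnt_cons_odd]
        cases W with
        | nil =>
          have hc : ¬ ((List.length ([] : List Int) : Int) ≠ 0) := by simp
          have hc1 : ¬ (t = p ∨ t > p) := by omega
          rw [if_neg hc, List.nil_append, aCnt_cons_cons, if_neg hc1]
          rw [show aCnt (p :: ps) ts = aCnt ([] ++ (p :: ps)) ts from by rw [List.nil_append]]
          exact ihT (p :: ps) [] hP (List.pairwise_cons.1 hT).2 (by simp)
        | cons x W' =>
          have hxt : x ≤ t := hW x (by simp) t (by simp)
          have hc1 : t = x ∨ t > x := by omega
          have hc2 : ((x :: W').length : Int) ≠ 0 := by push_cast [List.length_cons]; omega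
          rw [List.cons_append, aCnt_cons_cons, if_pos hc1, if_pos hc2,
              show ((x :: W').length : Int) - 1 = (W'.length : Int) from by push_cast [List.length_cons]; omega]
          rw [ihT (p :: ps) W' hP (List.pairwise_cons.1 hT).2
            (fun y hy t' ht' => hW y (List.mem_cons_of_mem x hy) t' (List.mem_cons_of_mem t ht'))]

-- ===== VERDICT (by name: the statement is the Claim_ definition above) =====
theorem solution_spec : Claim_equal_solution := by
  intro people tshirts _
  unfold Spec_solution solution solution_alt
  rw [foldA_eq, foldB_eq]
  have hP : (PySem.List.sorted people (fun x => x) false).Pairwise (· ≤ ·) :=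
    PySem.List.sorted_pairwise people (fun x => x)
  have hT : (PySem.List.sorted tshirts (fun x => x) false).Pairwise (· ≤ ·) :=
    PySem.List.sorted_pairwise tshirts (fun x => x)
  have hkey : PySem.List.sorted
      ((PySem.List.sorted people (fun x => x) false).map (fun p => 2 * p) ++
       (PySem.List.sorted tshirts (fun x => x) false).map (fun t => 2 * t + 1)) (fun x => x) false
      = evMerge (PySem.List.sorted people (fun x => x) false)
          (PySem.List.sorted tshirts (fun x => x) false) :=
    PySem.List.sorted_id_eq_of_perm_of_pairwise _ _
      (evMerge_perm _ _) (evMerge_pairwise _ _ hP hT)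
  rw [hkey]
  have h := main_corr (PySem.List.sorted tshirts (fun x => x) false)
    (PySem.List.sorted people (fun x => x) false) [] hP hT (by simp)
  simpa using h
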